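-- pv_equiv track=rewrite | github.com/mahadeokhamgal/interview_questions | DSA/array.py | commonDigitLongestSubsequence
-- ===== SOURCE A (Python) =====
-- from typing import List
-- import collections
--
-- def commonDigitLongestSubsequence(nums: List[int]) -> int: # Mine
--     N = len(nums)
--     dp = [0] * N
--     dp[N-1] = 1
--     longestDict = collections.defaultdict(int)
--     ans = 0
--
--     for i in range(N-1, -1, -1):
--         num = nums[i]
--         currMax = 1
--         while num:
--             digit = num % 10
--             currMax = max(currMax, longestDict[digit]+1)
--             num //= 10
--
--         num = nums[i]
--         while num:
--             digit = num % 10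
--             longestDict[digit] = currMax
--             num //= 10
--
--         ans = max(ans, currMax)
--
--     return ans
-- ===== SOURCE B (Python) =====
-- from typing import List
--
-- def _digits(num):
--     s = set()
--     while num:
--         s.add(num % 10)
--         num //= 10
--     return s
--
-- def commonDigitLongestSubsequence(nums: List[int]) -> int:
--     # O(N^2) pairwise DP over the elements processed right-to-left:
--     # dp keeps (digit_set, best chain length starting there) for each processed element.
--     dp = []
--     ans = 0
--     for x in reversed(nums):
--         d = _digits(x)
--         best = 1
--         for dj, vj in dp:
--             if d & dj:
--                 best = max(best, vj + 1)
--         dp.append((d, best))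
--         ans = max(ans, best)
--     return ans
-- ===== Notes on version B (the rewrite author's own statement) =====
-- stated objective: alternative
-- what changed: Replaces A's digit-indexed dictionary DP (per-element digit loop updating a best-chain-per-digit dict) with an explicit all-pairs DP that scans every previously processed element and tests digit-set intersection.
import Mathlib
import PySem

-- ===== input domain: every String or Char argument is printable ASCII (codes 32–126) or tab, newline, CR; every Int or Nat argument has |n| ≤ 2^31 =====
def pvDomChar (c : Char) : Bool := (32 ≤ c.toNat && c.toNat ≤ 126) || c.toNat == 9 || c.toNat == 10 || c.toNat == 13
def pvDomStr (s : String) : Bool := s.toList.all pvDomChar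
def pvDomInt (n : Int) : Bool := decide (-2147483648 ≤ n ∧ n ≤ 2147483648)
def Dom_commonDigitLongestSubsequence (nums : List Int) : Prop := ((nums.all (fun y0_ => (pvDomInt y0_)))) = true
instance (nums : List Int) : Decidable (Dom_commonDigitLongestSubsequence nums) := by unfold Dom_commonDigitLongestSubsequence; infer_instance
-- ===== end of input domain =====

-- B replaces A's per-digit dictionary DP with an all-pairs digit-set-intersection DP (alternative
-- decomposition, O(N^2) pairwise scan instead of the digit-indexed dict); equal on Pre_.

-- ===== PORT A =====
-- 'while num: digit = num % 10; currMax = max(currMax, longestDict[digit]+1); num //= 10'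
-- (guard 'num ≤ 0': Python's 'while num' diverges for negative num — such inputs are outside Pre_)
def pvAScan (D : PySem.Dict Int Int) (num currMax : Int) : Int :=
  if num ≤ 0 then currMax
  else pvAScan D (PySem.Int.floordiv num 10) (max currMax (D.getD (PySem.Int.mod num 10) 0 + 1))
termination_by num.toNat
decreasing_by
  rw [PySem.Int.floordiv_eq_ediv_of_pos (by norm_num : (0:Int) < 10)]
  omega

-- 'while num: digit = num % 10; longestDict[digit] = currMax; num //= 10'
def pvAWrite (D : PySem.Dict Int Int) (num currMax : Int) : PySem.Dict Int Int :=
  if num ≤ 0 then D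
  else pvAWrite (D.insert (PySem.Int.mod num 10) currMax) (PySem.Int.floordiv num 10) currMax
termination_by num.toNat
decreasing_by
  rw [PySem.Int.floordiv_eq_ediv_of_pos (by norm_num : (0:Int) < 10)]
  omega

def commonDigitLongestSubsequence (nums : List Int) : Int :=
  let N : Int := nums.length
  -- dp = [0] * N; dp[N-1] = 1 : IndexError when N = 0 (excluded by Pre_); dp is never read again
  let st := (PySem.List.pyRange (N - 1) (-1) (-1)).foldl
    (fun (st : PySem.Dict Int Int × Int) i =>
      let num := PySem.List.pyGetD nums i 0  -- i is always a valid index of nums here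
      let currMax := pvAScan st.1 num 1
      (pvAWrite st.1 num currMax, max st.2 currMax))
    (PySem.Dict.empty, 0)
  st.2

-- ===== PORT B =====
-- '_digits': s = set(); while num: s.add(num % 10); num //= 10  (same divergence guard as above)
def pvDigitsAux (s : PySem.Set Int) (num : Int) : PySem.Set Int :=
  if num ≤ 0 then s
  else pvDigitsAux (PySem.Set.add s (PySem.Int.mod num 10)) (PySem.Int.floordiv num 10)
termination_by num.toNat
decreasing_by
  rw [PySem.Int.floordiv_eq_ediv_of_pos (by norm_num : (0:Int) < 10)]
  omega

def pvDigits (num : Int) : PySem.Set Int := pvDigitsAux PySem.Set.empty num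

def commonDigitLongestSubsequence_alt (nums : List Int) : Int :=
  let st := nums.reverse.foldl
    (fun (st : List (PySem.Set Int × Int) × Int) x =>
      let d := pvDigits x
      -- 'if d & dj: best = max(best, vj + 1)' — truthiness of the set intersection
      let best := st.1.foldl
        (fun b p => if (PySem.Set.inter d p.1).isEmpty then b else max b (p.2 + 1)) 1
      (st.1 ++ [(d, best)], max st.2 best))
    ([], 0)
  st.2

-- ===== PRECONDITION & SPEC =====
-- Pre_ excludes the empty list (A's 'dp[N-1] = 1' raises IndexError there) and lists with a
-- negative element (A's 'while num' digit loop never terminates for negative num).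
def Pre_commonDigitLongestSubsequence (nums : List Int) : Prop :=
  nums ≠ [] ∧ ∀ x ∈ nums, 0 ≤ x
instance (nums : List Int) : Decidable (Pre_commonDigitLongestSubsequence nums) := by
  unfold Pre_commonDigitLongestSubsequence; infer_instance

def pvWitness_commonDigitLongestSubsequence : List Int := [12, 25, 57, 4]

def Spec_commonDigitLongestSubsequence (nums : List Int) (out : Int) : Prop := out = commonDigitLongestSubsequence_alt nums
instance (nums : List Int) (out : Int) : Decidable (Spec_commonDigitLongestSubsequence nums out) := by unfold Spec_commonDigitLongestSubsequence; infer_instance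

-- ===== CLAIM (what is proved, stated in full; the proofs are below) =====
def Claim_equal_commonDigitLongestSubsequence : Prop := ∀ (nums : List Int), Dom_commonDigitLongestSubsequence nums → Pre_commonDigitLongestSubsequence nums → Spec_commonDigitLongestSubsequence nums (commonDigitLongestSubsequence nums)

-- ===== LEMMAS AND PROOFS =====

-- The digit list of num in A's extraction order (proof-side abstraction of both digit loops).
def digitsM (num : Int) : List Int :=
  if num ≤ 0 then []
  else PySem.Int.mod num 10 :: digitsM (PySem.Int.floordiv num 10)
termination_by num.toNat
decreasing_by
  rw [PySem.Int.floordiv_eq_ediv_of_pos (by norm_num : (0:Int) < 10)]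
  omega

-- Best chain value recorded in dp for a digit (what A's dict maintains, stated on B's dp list).
def pvMaxOver (dp : List (PySem.Set Int × Int)) (dig : Int) : Int :=
  dp.foldl (fun m p => if dig ∈ p.1 then max m p.2 else m) 0

theorem pvMaxOver_nil (dig : Int) : pvMaxOver [] dig = 0 := rfl

-- generic running-max characterizations for the three fold shapes in the two ports

theorem amax_ge_init {α : Type} (l : List α) (g : α → Int) (c : Int) :
    c ≤ l.foldl (fun b y => max b (g y)) c := by
  induction l generalizing c with
  | nil => simp
  | cons h t ih => exact le_trans (le_max_left _ _) (ih _)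

theorem amax_ge_mem {α : Type} (l : List α) (g : α → Int) (c : Int) :
    ∀ y ∈ l, g y ≤ l.foldl (fun b y => max b (g y)) c := by
  induction l generalizing c with
  | nil => simp
  | cons h t ih =>
    intro y hy
    simp only [List.foldl_cons]
    rcases List.mem_cons.mp hy with rfl | hy'
    · exact le_trans (le_max_right _ _) (amax_ge_init t g _)
    · exact ih _ y hy'

theorem amax_cases {α : Type} (l : List α) (g : α → Int) (c : Int) :
    l.foldl (fun b y => max b (g y)) c = c ∨
      ∃ y ∈ l, l.foldl (fun b y => max b (g y)) c = g y := by
  induction l generalizing c with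
  | nil => left; rfl
  | cons h t ih =>
    simp only [List.foldl_cons]
    rcases ih (max c (g h)) with heq | ⟨y, hy, heq⟩
    · rcases max_choice c (g h) with hm | hm
      · left; rw [heq, hm]
      · right; exact ⟨h, List.mem_cons_self .., by rw [heq, hm]⟩
    · right; exact ⟨y, List.mem_cons_of_mem _ hy, heq⟩

theorem gmax_ge_init {α : Type} (l : List α) (Q : α → Bool) (g : α → Int) (c : Int) :
    c ≤ l.foldl (fun b y => if Q y = true then b else max b (g y)) c := by
  induction l generalizing c with
  | nil => simp
  | cons h t ih =>
    simp only [List.foldl_cons]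
    by_cases hq : Q h = true
    · rw [if_pos hq]; exact ih c
    · rw [if_neg hq]; exact le_trans (le_max_left _ _) (ih _)

theorem gmax_ge_mem {α : Type} (l : List α) (Q : α → Bool) (g : α → Int) (c : Int) :
    ∀ y ∈ l, Q y = false → g y ≤ l.foldl (fun b y => if Q y = true then b else max b (g y)) c := by
  induction l generalizing c with
  | nil => simp
  | cons h t ih =>
    intro y hy hQ
    simp only [List.foldl_cons]
    rcases List.mem_cons.mp hy with rfl | hy'
    · rw [if_neg (by simp [hQ])]
      exact le_trans (le_max_right _ _) (gmax_ge_init t Q g _)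
    · split_ifs <;> exact ih _ y hy' hQ

theorem gmax_cases {α : Type} (l : List α) (Q : α → Bool) (g : α → Int) (c : Int) :
    l.foldl (fun b y => if Q y = true then b else max b (g y)) c = c ∨
      ∃ y ∈ l, Q y = false ∧ l.foldl (fun b y => if Q y = true then b else max b (g y)) c = g y := by
  induction l generalizing c with
  | nil => left; rfl
  | cons h t ih =>
    simp only [List.foldl_cons]
    by_cases hq : Q h = true
    · rw [if_pos hq]
      rcases ih c with heq | ⟨y, hy, hQ, heq⟩
      · left; exact heq
      · right; exact ⟨y, List.mem_cons_of_mem _ hy, hQ, heq⟩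
    · rw [if_neg hq]
      rcases ih (max c (g h)) with heq | ⟨y, hy, hQ, heq⟩
      · rcases max_choice c (g h) with hm | hm
        · left; rw [heq, hm]
        · right; exact ⟨h, List.mem_cons_self .., Bool.eq_false_iff.mpr hq, by rw [heq, hm]⟩
      · right; exact ⟨y, List.mem_cons_of_mem _ hy, hQ, heq⟩

theorem pmax_ge_init (dp : List (PySem.Set Int × Int)) (dig : Int) (c : Int) :
    c ≤ dp.foldl (fun m p => if dig ∈ p.1 then max m p.2 else m) c := by
  induction dp generalizing c with
  | nil => simp
  | cons h t ih =>
    simp only [List.foldl_cons]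
    by_cases hq : dig ∈ h.1
    · rw [if_pos hq]; exact le_trans (le_max_left _ _) (ih _)
    · rw [if_neg hq]; exact ih c

theorem pmax_ge_mem (dp : List (PySem.Set Int × Int)) (dig : Int) (c : Int) :
    ∀ p ∈ dp, dig ∈ p.1 → p.2 ≤ dp.foldl (fun m p => if dig ∈ p.1 then max m p.2 else m) c := by
  induction dp generalizing c with
  | nil => simp
  | cons h t ih =>
    intro p hp hmem
    simp only [List.foldl_cons]
    rcases List.mem_cons.mp hp with rfl | hp'
    · rw [if_pos hmem]
      exact le_trans (le_max_right _ _) (pmax_ge_init t dig _)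
    · split_ifs <;> exact ih _ p hp' hmem

theorem pmax_cases (dp : List (PySem.Set Int × Int)) (dig : Int) (c : Int) :
    dp.foldl (fun m p => if dig ∈ p.1 then max m p.2 else m) c = c ∨
      ∃ p ∈ dp, dig ∈ p.1 ∧ dp.foldl (fun m p => if dig ∈ p.1 then max m p.2 else m) c = p.2 := by
  induction dp generalizing c with
  | nil => left; rfl
  | cons h t ih =>
    simp only [List.foldl_cons]
    by_cases hq : dig ∈ h.1
    · rw [if_pos hq]
      rcases ih (max c h.2) with heq | ⟨p, hp, hm, heq⟩
      · rcases max_choice c h.2 with hm | hm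
        · left; rw [heq, hm]
        · right; exact ⟨h, List.mem_cons_self .., hq, by rw [heq, hm]⟩
      · right; exact ⟨p, List.mem_cons_of_mem _ hp, hm, heq⟩
    · rw [if_neg hq]
      rcases ih c with heq | ⟨p, hp, hm, heq⟩
      · left; exact heq
      · right; exact ⟨p, List.mem_cons_of_mem _ hp, hm, heq⟩

-- A's first digit loop computes the running max over the digit list of num
theorem pvAScan_eq (D : PySem.Dict Int Int) (num c : Int) :
    pvAScan D num c = (digitsM num).foldl (fun b dig => max b (D.getD dig 0 + 1)) c := by
  fun_induction pvAScan D num c with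
  | case1 num c h => rw [digitsM, if_pos h]; rfl
  | case2 num c h ih => rw [digitsM, if_neg h]; simp only [List.foldl_cons]; exact ih

-- A's second digit loop overwrites exactly the digits of num with currMax
theorem pvAWrite_getD (D : PySem.Dict Int Int) (num c dig : Int) :
    (pvAWrite D num c).getD dig 0 = if dig ∈ digitsM num then c else D.getD dig 0 := by
  fun_induction pvAWrite D num c with
  | case1 num c h => rw [digitsM, if_pos h]; simp
  | case2 num c h ih =>
    rw [digitsM, if_neg h, ih, PySem.Dict.getD_insert]
    simp only [List.mem_cons]
    split_ifs <;> tauto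

-- B's digit set holds exactly the digits of num
theorem pvDigitsAux_mem (s : PySem.Set Int) (num dig : Int) :
    dig ∈ pvDigitsAux s num ↔ dig ∈ s ∨ dig ∈ digitsM num := by
  fun_induction pvDigitsAux s num with
  | case1 s num h => rw [digitsM, if_pos h]; simp
  | case2 s num h ih =>
    rw [digitsM, if_neg h, ih, PySem.Set.mem_add]
    simp only [List.mem_cons]
    tauto

theorem pvDigits_mem (num dig : Int) : dig ∈ pvDigits num ↔ dig ∈ digitsM num := by
  unfold pvDigits
  rw [pvDigitsAux_mem]
  simp [PySem.Set.empty]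

-- Python truthiness of 'd & t'
theorem inter_isEmpty_iff (d t : PySem.Set Int) :
    (PySem.Set.inter d t).isEmpty = true ↔ ∀ y, ¬(y ∈ d ∧ y ∈ t) := by
  rw [List.isEmpty_iff, List.eq_nil_iff_forall_not_mem]
  constructor
  · intro h y hy
    exact h y ((PySem.Set.mem_inter d t y).mpr hy)
  · intro h y hy
    exact h y ((PySem.Set.mem_inter d t y).mp hy)

theorem pvMaxOver_append (dp : List (PySem.Set Int × Int)) (q : PySem.Set Int × Int) (dig : Int) :
    pvMaxOver (dp ++ [q]) dig =
      if dig ∈ q.1 then max (pvMaxOver dp dig) q.2 else pvMaxOver dp dig := by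
  unfold pvMaxOver
  rw [List.foldl_append]
  simp only [List.foldl_cons, List.foldl_nil]

theorem pvMaxOver_cases (dp : List (PySem.Set Int × Int)) (dig : Int) :
    pvMaxOver dp dig = 0 ∨ ∃ p ∈ dp, dig ∈ p.1 ∧ pvMaxOver dp dig = p.2 :=
  pmax_cases dp dig 0

theorem pvMaxOver_ge_mem (dp : List (PySem.Set Int × Int)) (dig : Int) :
    ∀ p ∈ dp, dig ∈ p.1 → p.2 ≤ pvMaxOver dp dig :=
  pmax_ge_mem dp dig 0

-- the two per-element best-value computations agree under the dict/dp invariant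
theorem scan_eq_best (D : PySem.Dict Int Int) (dp : List (PySem.Set Int × Int)) (x : Int)
    (hD : ∀ dig, D.getD dig 0 = pvMaxOver dp dig) :
    pvAScan D x 1 =
      dp.foldl (fun b p => if (PySem.Set.inter (pvDigits x) p.1).isEmpty = true then b
                           else max b (p.2 + 1)) 1 := by
  rw [pvAScan_eq]
  apply le_antisymm
  · rcases amax_cases (digitsM x) (fun dig => D.getD dig 0 + 1) 1 with heq | ⟨dig, hdig, heq⟩
    · rw [heq]
      exact gmax_ge_init dp _ (fun p => p.2 + 1) 1
    · rw [heq, hD]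
      rcases pvMaxOver_cases dp dig with h0 | ⟨p, hp, hm, hpv⟩
      · rw [h0]
        simpa using gmax_ge_init dp (fun p => (PySem.Set.inter (pvDigits x) p.1).isEmpty)
          (fun p => p.2 + 1) 1
      · rw [hpv]
        refine gmax_ge_mem dp _ (fun p => p.2 + 1) 1 p hp ?_
        rw [Bool.eq_false_iff]
        intro hemp
        exact (inter_isEmpty_iff _ _).mp hemp dig ⟨(pvDigits_mem x dig).mpr hdig, hm⟩
  · rcases gmax_cases dp (fun p => (PySem.Set.inter (pvDigits x) p.1).isEmpty)
      (fun p => p.2 + 1) 1 with heq | ⟨p, hp, hQ, heq⟩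
    · rw [heq]
      exact amax_ge_init _ _ _
    · rw [heq]
      have hne : PySem.Set.inter (pvDigits x) p.1 ≠ [] := by
        intro hnil
        rw [Bool.eq_false_iff] at hQ
        exact hQ (List.isEmpty_iff.mpr hnil)
      obtain ⟨dig, hdig⟩ := List.exists_mem_of_ne_nil _ hne
      obtain ⟨hd1, hd2⟩ := (PySem.Set.mem_inter _ _ _).mp hdig
      have h1 : p.2 ≤ pvMaxOver dp dig := pvMaxOver_ge_mem dp dig p hp hd2
      rw [← hD dig] at h1
      have h2 : D.getD dig 0 + 1 ≤
          (digitsM x).foldl (fun b dig => max b (D.getD dig 0 + 1)) 1 :=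
        amax_ge_mem (digitsM x) _ 1 dig ((pvDigits_mem x dig).mp hd1)
      omega

-- one loop iteration of each port, named for the fold invariant
def stepA (st : PySem.Dict Int Int × Int) (num : Int) : PySem.Dict Int Int × Int :=
  (pvAWrite st.1 num (pvAScan st.1 num 1), max st.2 (pvAScan st.1 num 1))

def stepB (st : List (PySem.Set Int × Int) × Int) (x : Int) : List (PySem.Set Int × Int) × Int :=
  (st.1 ++ [(pvDigits x,
     st.1.foldl (fun b p => if (PySem.Set.inter (pvDigits x) p.1).isEmpty = true then b
                            else max b (p.2 + 1)) 1)],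
   max st.2 (st.1.foldl (fun b p => if (PySem.Set.inter (pvDigits x) p.1).isEmpty = true then b
                                    else max b (p.2 + 1)) 1))

theorem fold_rel (r : List Int) :
    ∀ (D : PySem.Dict Int Int) (dp : List (PySem.Set Int × Int)) (ans : Int),
      (∀ dig, D.getD dig 0 = pvMaxOver dp dig) →
      (r.foldl stepA (D, ans)).2 = (r.foldl stepB (dp, ans)).2 := by
  induction r with
  | nil => intro D dp ans _; rfl
  | cons x r ih =>
    intro D dp ans hD
    simp only [List.foldl_cons]
    have hbest := scan_eq_best D dp x hD
    unfold stepA stepB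
    simp only []
    rw [hbest]
    apply ih
    intro dig
    rw [pvAWrite_getD, pvMaxOver_append]
    by_cases hm : dig ∈ digitsM x
    · rw [if_pos hm, if_pos ((pvDigits_mem x dig).mpr hm)]
      have h1 : D.getD dig 0 + 1 ≤ pvAScan D x 1 := by
        rw [pvAScan_eq]
        exact amax_ge_mem (digitsM x) _ 1 dig hm
      rw [← hbest, ← hD dig]
      omega
    · rw [if_neg hm, if_neg (fun h => hm ((pvDigits_mem x dig).mp h)), hD]

theorem map_get_range (nums : List Int) :
    (PySem.List.pyRange ((nums.length : Int) - 1) (-1) (-1)).map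
        (fun i => PySem.List.pyGetD nums i 0) = nums.reverse := by
  rw [PySem.List.pyRange_neg_one]
  have hlen : (((nums.length : Int) - 1) - (-1)).toNat = nums.length := by omega
  rw [hlen, List.map_map]
  apply List.ext_getElem
  · simp
  · intro k h1 h2
    simp only [List.length_map, List.length_range] at h1
    simp only [List.getElem_map, List.getElem_range, Function.comp_apply, List.getElem_reverse]
    have hcast : ((nums.length : Int) - 1 - (k : Int)) = ((nums.length - 1 - k : Nat) : Int) := by
      omega
    rw [hcast, PySem.List.pyGetD_natCast]
    rw [List.getD_eq_getElem _ _ (by omega)]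

theorem A_eq (nums : List Int) :
    commonDigitLongestSubsequence nums = (nums.reverse.foldl stepA (PySem.Dict.empty, 0)).2 := by
  rw [← map_get_range nums, List.foldl_map]
  rfl

theorem B_eq (nums : List Int) :
    commonDigitLongestSubsequence_alt nums = (nums.reverse.foldl stepB ([], 0)).2 := rfl

-- ===== VERDICT (by name: the statement is the Claim_ definition above) =====
theorem commonDigitLongestSubsequence_spec : Claim_equal_commonDigitLongestSubsequence := by
  intro nums _ _
  unfold Spec_commonDigitLongestSubsequence
  rw [A_eq, B_eq]
  exact fold_rel nums.reverse PySem.Dict.empty [] 0 (fun dig => by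
    rw [pvMaxOver_nil, PySem.Dict.getD_empty])
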